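-- pv_equiv track=rewrite | github.com/ilveron/FondProg1 | DomJudge/Scripts/r4.py | Ricerca
-- ===== SOURCE A (Python) =====
-- def Ricerca(X, L, Somma):
--     C=0
--     for k in range(len(L)):
--         if L[k] == X:
--             L[k] = 0
--             C+=1
--     if C == 0:
--         return 0
--     else:
--         Somma=C
--         return(Somma+Ricerca(C,L,Somma))
-- ===== SOURCE B (Python) =====
-- def Ricerca(X, L, Somma):
--     # Iterative: count with list.count, zero matches via a comprehension written
--     # back in place (same mutation of L as the original), accumulate the chain sum.
--     total = 0
--     current = X
--     while True:
--         c = L.count(current)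
--         if c == 0:
--             return total
--         L[:] = [0 if v == current else v for v in L]
--         total += c
--         current = c
-- ===== Notes on version B (the rewrite author's own statement) =====
-- stated objective: simpler
-- what changed: Replaces the tail of recursive calls (manual index loop zeroing+counting, then Somma+Ricerca(C,L,Somma)) by a single while-loop with a running total, counting via list.count and zeroing via one comprehension written back in place; the inert Somma parameter is ignored.
import Mathlib
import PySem

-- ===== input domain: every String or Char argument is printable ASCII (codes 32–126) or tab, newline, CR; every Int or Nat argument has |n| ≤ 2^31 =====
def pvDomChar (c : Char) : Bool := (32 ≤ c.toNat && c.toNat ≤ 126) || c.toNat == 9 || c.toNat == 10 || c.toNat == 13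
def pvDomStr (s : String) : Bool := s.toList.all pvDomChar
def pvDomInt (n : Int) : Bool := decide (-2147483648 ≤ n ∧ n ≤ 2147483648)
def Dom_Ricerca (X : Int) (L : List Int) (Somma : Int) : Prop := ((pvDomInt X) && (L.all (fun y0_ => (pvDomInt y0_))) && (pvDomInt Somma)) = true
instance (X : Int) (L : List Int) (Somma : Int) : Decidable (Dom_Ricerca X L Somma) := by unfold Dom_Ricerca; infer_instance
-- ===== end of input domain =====

-- B replaces A's recursion (manual index loop zeroing+counting, then Somma+Ricerca(C,L,Somma))
-- by an iterative accumulator loop using list.count and a comprehension rebuild: same return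
-- value (and both Pythons perform the same in-place zeroing of L); objective: simpler decomposition.


-- ===== PORT A =====
-- the in-place zeroing scan 'for k in range(len(L)): if L[k]==X: L[k]=0; C+=1'
-- as a structural recursion returning (C, the updated list)
def zeroPass (X : Int) (L : List Int) : Int × List Int :=
  match L with
  | [] => (0, [])
  | a :: t =>
      let p := zeroPass X t
      if a = X then (p.1 + 1, 0 :: p.2) else (p.1, a :: p.2)

-- 'L with every element equal to X replaced by 0' (B's comprehension; also the value of A's scan)
def zeroMap (X : Int) (L : List Int) : List Int :=
  L.map (fun v => if v = X then 0 else v)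

theorem zeroPass_fst (X : Int) (L : List Int) : (zeroPass X L).1 = (L.count X : Int) := by
  induction L with
  | nil => simp [zeroPass]
  | cons a t ih => by_cases h : a = X <;> simp [zeroPass, h, ih]

theorem zeroPass_snd (X : Int) (L : List Int) : (zeroPass X L).2 = zeroMap X L := by
  induction L with
  | nil => simp [zeroPass, zeroMap]
  | cons a t ih => by_cases h : a = X <;> simp [zeroPass, zeroMap, h] <;> simpa [zeroMap] using ih

theorem zeroMap_zero_id (L : List Int) : zeroMap 0 L = L := by
  induction L with
  | nil => rfl
  | cons a t ih => by_cases h : a = (0:Int) <;> simp [zeroMap, h] <;> simpa [zeroMap] using ih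

theorem nz_zeroMap_add_count (X : Int) (hX : X ≠ 0) (L : List Int) :
    (zeroMap X L).countP (fun v => v != 0) + L.count X = L.countP (fun v => v != 0) := by
  induction L with
  | nil => rfl
  | cons a t ih =>
    simp only [zeroMap, List.map_cons, List.countP_cons, List.countP_map, List.count_cons] at ih ⊢
    by_cases h : a = X
    · simp [h, hX] at ih ⊢
      omega
    · simp [h] at ih ⊢
      omega

-- the termination measure decreases at every step of the chain
theorem chain_measure_dec (X : Int) (L : List Int) (h : (L.count X : Int) ≠ 0) :
    2 * (zeroMap X L).countP (fun v => v != 0)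
      < 2 * L.countP (fun v => v != 0) + (if X = 0 then 1 else 0) := by
  have hc : 1 ≤ L.count X := by omega
  by_cases hX : X = 0
  · subst hX
    simp [zeroMap_zero_id]
  · have hmap := nz_zeroMap_add_count X hX L
    rw [if_neg hX]
    omega

def Ricerca (X : Int) (L : List Int) (Somma : Int) : Int :=
  let p := zeroPass X L
  if p.1 = 0 then 0
  else p.1 + Ricerca p.1 p.2 p.1
termination_by 2 * L.countP (fun v => v != 0) + (if X = 0 then 1 else 0)
decreasing_by
  have hp1 : (zeroPass X L).1 ≠ 0 := ‹¬ (zeroPass X L).1 = 0›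
  have hcall := chain_measure_dec X L (by rw [← zeroPass_fst]; exact hp1)
  rw [zeroPass_snd]
  simp only [if_neg hp1]
  omega

-- ===== PORT B =====
-- while-loop of Source B: count with list.count, rebuild L by a comprehension, accumulate
def altLoop (current : Int) (L : List Int) (total : Int) : Int :=
  let c : Int := (PySem.List.count L current : Int)
  if c = 0 then total
  else altLoop c (zeroMap current L) (total + c)
termination_by 2 * L.countP (fun v => v != 0) + (if current = 0 then 1 else 0)
decreasing_by
  rename_i h
  have h' : ((PySem.List.count L current : Nat) : Int) ≠ 0 := h
  have hcall := chain_measure_dec current L (by simpa [PySem.List.count_eq] using h')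
  rw [if_neg h']
  omega

def Ricerca_alt (X : Int) (L : List Int) (Somma : Int) : Int :=
  altLoop X L 0

-- ===== PRECONDITION & SPEC =====
def Spec_Ricerca (X : Int) (L : List Int) (Somma : Int) (out : Int) : Prop := out = Ricerca_alt X L Somma
instance (X : Int) (L : List Int) (Somma : Int) (out : Int) : Decidable (Spec_Ricerca X L Somma out) := by unfold Spec_Ricerca; infer_instance

-- ===== CLAIM (what is proved, stated in full; the proofs are below) =====
def Claim_equal_Ricerca : Prop := ∀ (X : Int) (L : List Int) (Somma : Int), Dom_Ricerca X L Somma → Spec_Ricerca X L Somma (Ricerca X L Somma)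

-- ===== LEMMAS AND PROOFS =====
theorem altLoop_eq_add_Ricerca (X : Int) (L : List Int) (total Somma : Int) :
    altLoop X L total = total + Ricerca X L Somma := by
  rw [altLoop, Ricerca]
  have hc : ((PySem.List.count L X : Nat) : Int) = (zeroPass X L).1 := by
    rw [PySem.List.count_eq, zeroPass_fst]
  by_cases h : (zeroPass X L).1 = 0
  · rw [if_pos (by rw [hc]; exact h), if_pos h]
    ring
  · have hrec := altLoop_eq_add_Ricerca (zeroPass X L).1 (zeroMap X L)
      (total + (zeroPass X L).1) (zeroPass X L).1
    rw [if_neg (by rw [hc]; exact h), if_neg h, hc, hrec, zeroPass_snd]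
    ring
termination_by 2 * L.countP (fun v => v != 0) + (if X = 0 then 1 else 0)
decreasing_by
  have hcall := chain_measure_dec X L (by rw [← zeroPass_fst]; exact h)
  simp only [if_neg h]
  omega

-- ===== VERDICT (by name: the statement is the Claim_ definition above) =====
theorem Ricerca_spec : Claim_equal_Ricerca := by
  intro X L Somma _
  unfold Spec_Ricerca Ricerca_alt
  rw [altLoop_eq_add_Ricerca X L 0 Somma]
  ring
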